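-- pv_equiv track=rewrite | github.com/QUANHAO-NCU/pytorch-visual-block | Working/myMethods/Tools.py | ConvTransposeHW2newHW
-- ===== SOURCE A (Python) =====
-- def ConvTransposeHW2newHW(HWin: list, HWout: list):
--     """
--     计算转置卷积时从旧HW转换到新HW时的可以使用的kernel_size,stride,padding参数
--     """
--     result = []
--     Hin = HWin[0]
--     Win = HWin[1]
--     Hout = HWout[0]
--     Wout = HWout[1]
--     for k in range(1, 15):
--         for s in range(1, 10):
--             for p in range(0, 10):
--                 tmpH = (Hin - 1) * s - 2 * p + k
--                 tmpW = (Win - 1) * s - 2 * p + k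
--                 if tmpH == Hout and tmpW == Wout:
--                     result.append([k, s, p])
--     return result
-- ===== SOURCE B (Python) =====
-- def ConvTransposeHW2newHW(HWin: list, HWout: list):
--     """
--     计算转置卷积时从旧HW转换到新HW时的可以使用的kernel_size,stride,padding参数
--     """
--     result = []
--     Hin = HWin[0]
--     Win = HWin[1]
--     Hout = HWout[0]
--     Wout = HWout[1]
--     for k in range(1, 15):
--         for s in range(1, 10):
--             # solve (Hin - 1) * s - 2 * p + k == Hout for p in closed form
--             num = (Hin - 1) * s + k - Hout
--             if num >= 0 and num % 2 == 0:
--                 p = num // 2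
--                 if p <= 9 and (Win - 1) * s - 2 * p + k == Wout:
--                     result.append([k, s, p])
--     return result
-- ===== Notes on version B (the rewrite author's own statement) =====
-- stated objective: alternative
-- what changed: The innermost brute-force loop over padding p (10 candidate checks per (k,s)) is replaced by a closed-form solve of the H-equation (p = ((Hin-1)*s + k - Hout) // 2 when that numerator is non-negative and even, bounded by 9) followed by an independent W-equation check, turning the triple loop into a double loop.
import Mathlib
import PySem

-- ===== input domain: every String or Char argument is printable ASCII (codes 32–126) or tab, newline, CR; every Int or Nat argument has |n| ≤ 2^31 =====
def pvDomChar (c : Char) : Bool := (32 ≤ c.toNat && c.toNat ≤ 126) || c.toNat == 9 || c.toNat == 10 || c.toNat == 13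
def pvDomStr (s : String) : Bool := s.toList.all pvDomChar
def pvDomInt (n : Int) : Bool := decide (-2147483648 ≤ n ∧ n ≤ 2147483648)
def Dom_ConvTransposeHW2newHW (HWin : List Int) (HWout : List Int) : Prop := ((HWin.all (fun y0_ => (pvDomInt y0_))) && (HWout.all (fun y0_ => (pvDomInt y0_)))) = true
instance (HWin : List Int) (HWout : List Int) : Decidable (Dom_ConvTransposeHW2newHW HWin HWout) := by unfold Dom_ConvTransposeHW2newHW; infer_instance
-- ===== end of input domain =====

-- B replaces the brute-force innermost loop over the padding p by a closed-form solve of the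
-- H-equation plus an independent W-equation check (objective: alternative, fewer candidate checks).

-- ===== PORT A =====
def ConvTransposeHW2newHW (HWin : List Int) (HWout : List Int) : List (List Int) :=
  match PySem.List.pyGet? HWin 0, PySem.List.pyGet? HWin 1,
        PySem.List.pyGet? HWout 0, PySem.List.pyGet? HWout 1 with
  | some Hin, some Win, some Hout, some Wout =>
    (PySem.List.pyRange 1 15 1).foldl (fun result k =>
      (PySem.List.pyRange 1 10 1).foldl (fun result s =>
        (PySem.List.pyRange 0 10 1).foldl (fun result p =>
          let tmpH := (Hin - 1) * s - 2 * p + k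
          let tmpW := (Win - 1) * s - 2 * p + k
          if tmpH = Hout ∧ tmpW = Wout then result ++ [[k, s, p]] else result)
          result) result) []
  | _, _, _, _ => []   -- unreachable under Pre_ (Python raises IndexError)

-- ===== PORT B =====
def ConvTransposeHW2newHW_alt (HWin : List Int) (HWout : List Int) : List (List Int) :=
  match PySem.List.pyGet? HWin 0 with
  | none => []   -- unreachable under Pre_ (Python raises IndexError)
  | some Hin =>
  match PySem.List.pyGet? HWin 1 with
  | none => []
  | some Win =>
  match PySem.List.pyGet? HWout 0 with
  | none => []
  | some Hout =>
  match PySem.List.pyGet? HWout 1 with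
  | none => []
  | some Wout =>
    (PySem.List.pyRange 1 15 1).foldl (fun result k =>
      (PySem.List.pyRange 1 10 1).foldl (fun result s =>
        let num := (Hin - 1) * s + k - Hout
        if 0 ≤ num ∧ PySem.Int.mod num 2 = 0 then
          let p := PySem.Int.floordiv num 2
          if p ≤ 9 ∧ (Win - 1) * s - 2 * p + k = Wout then result ++ [[k, s, p]]
          else result
        else result) result) []

-- ===== PRECONDITION & SPEC =====
-- Pre_ excludes exactly the inputs where Python A raises IndexError (an argument list shorter than 2).
def Pre_ConvTransposeHW2newHW (HWin : List Int) (HWout : List Int) : Prop :=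
  2 ≤ HWin.length ∧ 2 ≤ HWout.length
instance (HWin : List Int) (HWout : List Int) : Decidable (Pre_ConvTransposeHW2newHW HWin HWout) := by
  unfold Pre_ConvTransposeHW2newHW; infer_instance

def pvWitness_ConvTransposeHW2newHW : List Int × List Int := ([2, 2], [4, 4])

def Spec_ConvTransposeHW2newHW (HWin : List Int) (HWout : List Int) (out : List (List Int)) : Prop :=
  out = ConvTransposeHW2newHW_alt HWin HWout
instance (HWin : List Int) (HWout : List Int) (out : List (List Int)) : Decidable (Spec_ConvTransposeHW2newHW HWin HWout out) := by
  unfold Spec_ConvTransposeHW2newHW; infer_instance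

-- ===== CLAIM (what is proved, stated in full; the proofs are below) =====
def Claim_equal_ConvTransposeHW2newHW : Prop := ∀ (HWin : List Int) (HWout : List Int), Dom_ConvTransposeHW2newHW HWin HWout → Pre_ConvTransposeHW2newHW HWin HWout → Spec_ConvTransposeHW2newHW HWin HWout (ConvTransposeHW2newHW HWin HWout)

-- ===== LEMMAS AND PROOFS =====

-- the (at most one) padding produced by one (k, s) iteration, in closed form
def pvPad (Hin Win Hout Wout k s : Int) : List Int :=
  if 0 ≤ (Hin - 1) * s + k - Hout ∧ ((Hin - 1) * s + k - Hout) % 2 = 0 ∧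
     ((Hin - 1) * s + k - Hout) / 2 ≤ 9 ∧
     (Win - 1) * s - 2 * (((Hin - 1) * s + k - Hout) / 2) + k = Wout
  then [((Hin - 1) * s + k - Hout) / 2] else []

lemma filter10 (Hin Win Hout Wout k s : Int) :
    (PySem.List.pyRange 0 10 1).filter
        (fun p => decide ((Hin - 1) * s - 2 * p + k = Hout ∧ (Win - 1) * s - 2 * p + k = Wout))
      = pvPad Hin Win Hout Wout k s := by
  by_cases hg : 0 ≤ (Hin - 1) * s + k - Hout ∧ ((Hin - 1) * s + k - Hout) % 2 = 0 ∧
      ((Hin - 1) * s + k - Hout) / 2 ≤ 9 ∧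
      (Win - 1) * s - 2 * (((Hin - 1) * s + k - Hout) / 2) + k = Wout
  · rw [pvPad, if_pos hg]
    have h0 : (0 : Int) ≤ ((Hin - 1) * s + k - Hout) / 2 := by omega
    have h9 : ((Hin - 1) * s + k - Hout) / 2 < 10 := by omega
    rw [PySem.List.pyRange_one_append 0 (((Hin - 1) * s + k - Hout) / 2) 10 h0 (by omega),
        PySem.List.pyRange_one_cons h9, List.filter_append, List.filter_cons]
    have hL : (PySem.List.pyRange 0 (((Hin - 1) * s + k - Hout) / 2) 1).filter
        (fun p => decide ((Hin - 1) * s - 2 * p + k = Hout ∧ (Win - 1) * s - 2 * p + k = Wout)) = [] := by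
      rw [List.filter_eq_nil_iff]
      intro x hx
      rw [PySem.List.mem_pyRange_one] at hx
      simp only [decide_eq_true_eq]
      omega
    have hR : (PySem.List.pyRange (((Hin - 1) * s + k - Hout) / 2 + 1) 10 1).filter
        (fun p => decide ((Hin - 1) * s - 2 * p + k = Hout ∧ (Win - 1) * s - 2 * p + k = Wout)) = [] := by
      rw [List.filter_eq_nil_iff]
      intro x hx
      rw [PySem.List.mem_pyRange_one] at hx
      simp only [decide_eq_true_eq]
      omega
    have hq : ((Hin - 1) * s - 2 * (((Hin - 1) * s + k - Hout) / 2) + k = Hout ∧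
        (Win - 1) * s - 2 * (((Hin - 1) * s + k - Hout) / 2) + k = Wout) := ⟨by omega, hg.2.2.2⟩
    rw [hL, hR]
    simp [hq]
  · rw [pvPad, if_neg hg, List.filter_eq_nil_iff]
    intro x hx
    rw [PySem.List.mem_pyRange_one] at hx
    simp only [decide_eq_true_eq]
    omega

lemma A_inner (Hin Win Hout Wout k s : Int) (acc : List (List Int)) :
    (PySem.List.pyRange 0 10 1).foldl (fun result p =>
        let tmpH := (Hin - 1) * s - 2 * p + k
        let tmpW := (Win - 1) * s - 2 * p + k
        if tmpH = Hout ∧ tmpW = Wout then result ++ [[k, s, p]] else result) acc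
      = acc ++ (pvPad Hin Win Hout Wout k s).map (fun p => [k, s, p]) := by
  have hfun : (fun (result : List (List Int)) p =>
      let tmpH := (Hin - 1) * s - 2 * p + k
      let tmpW := (Win - 1) * s - 2 * p + k
      if tmpH = Hout ∧ tmpW = Wout then result ++ [[k, s, p]] else result)
      = (fun result p =>
        if (fun p => decide ((Hin - 1) * s - 2 * p + k = Hout ∧ (Win - 1) * s - 2 * p + k = Wout)) p
        then result ++ [(fun p : Int => [k, s, p]) p] else result) := by
    funext result p
    by_cases h : (Hin - 1) * s - 2 * p + k = Hout ∧ (Win - 1) * s - 2 * p + k = Wout <;>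
      simp [h]
  rw [hfun, PySem.List.foldl_append_if, filter10]

lemma B_inner (Hin Win Hout Wout k s : Int) (acc : List (List Int)) :
    (if 0 ≤ (Hin - 1) * s + k - Hout ∧ PySem.Int.mod ((Hin - 1) * s + k - Hout) 2 = 0 then
       if PySem.Int.floordiv ((Hin - 1) * s + k - Hout) 2 ≤ 9 ∧
          (Win - 1) * s - 2 * PySem.Int.floordiv ((Hin - 1) * s + k - Hout) 2 + k = Wout
       then acc ++ [[k, s, PySem.Int.floordiv ((Hin - 1) * s + k - Hout) 2]]
       else acc
     else acc)
      = acc ++ (pvPad Hin Win Hout Wout k s).map (fun p => [k, s, p]) := by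
  have hm : PySem.Int.mod ((Hin - 1) * s + k - Hout) 2 = ((Hin - 1) * s + k - Hout) % 2 :=
    PySem.Int.mod_eq_emod_of_pos (by norm_num)
  have hd : PySem.Int.floordiv ((Hin - 1) * s + k - Hout) 2 = ((Hin - 1) * s + k - Hout) / 2 :=
    PySem.Int.floordiv_eq_ediv_of_pos (by norm_num)
  rw [hm, hd, pvPad]
  split_ifs <;> first | (exfalso; omega) | simp

lemma loops_eq (Hin Win Hout Wout : Int) :
    (PySem.List.pyRange 1 15 1).foldl (fun result k =>
      (PySem.List.pyRange 1 10 1).foldl (fun result s =>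
        (PySem.List.pyRange 0 10 1).foldl (fun result p =>
          let tmpH := (Hin - 1) * s - 2 * p + k
          let tmpW := (Win - 1) * s - 2 * p + k
          if tmpH = Hout ∧ tmpW = Wout then result ++ [[k, s, p]] else result)
          result) result) ([] : List (List Int))
    = (PySem.List.pyRange 1 15 1).foldl (fun result k =>
      (PySem.List.pyRange 1 10 1).foldl (fun result s =>
        let num := (Hin - 1) * s + k - Hout
        if 0 ≤ num ∧ PySem.Int.mod num 2 = 0 then
          let p := PySem.Int.floordiv num 2
          if p ≤ 9 ∧ (Win - 1) * s - 2 * p + k = Wout then result ++ [[k, s, p]]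
          else result
        else result) result) ([] : List (List Int)) := by
  have hA : (fun (result : List (List Int)) k =>
      (PySem.List.pyRange 1 10 1).foldl (fun result s =>
        (PySem.List.pyRange 0 10 1).foldl (fun result p =>
          let tmpH := (Hin - 1) * s - 2 * p + k
          let tmpW := (Win - 1) * s - 2 * p + k
          if tmpH = Hout ∧ tmpW = Wout then result ++ [[k, s, p]] else result)
          result) result)
      = (fun result k => result ++ (PySem.List.pyRange 1 10 1).flatMap
          (fun s => (pvPad Hin Win Hout Wout k s).map (fun p => [k, s, p]))) := by
    funext result k
    have h1 : (fun (result : List (List Int)) s =>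
        (PySem.List.pyRange 0 10 1).foldl (fun result p =>
          let tmpH := (Hin - 1) * s - 2 * p + k
          let tmpW := (Win - 1) * s - 2 * p + k
          if tmpH = Hout ∧ tmpW = Wout then result ++ [[k, s, p]] else result)
          result)
        = (fun result s => result ++ (pvPad Hin Win Hout Wout k s).map (fun p => [k, s, p])) := by
      funext result s; exact A_inner Hin Win Hout Wout k s result
    rw [h1, PySem.List.foldl_append_eq_flatMap]
  have hB : (fun (result : List (List Int)) k =>
      (PySem.List.pyRange 1 10 1).foldl (fun result s =>
        let num := (Hin - 1) * s + k - Hout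
        if 0 ≤ num ∧ PySem.Int.mod num 2 = 0 then
          let p := PySem.Int.floordiv num 2
          if p ≤ 9 ∧ (Win - 1) * s - 2 * p + k = Wout then result ++ [[k, s, p]]
          else result
        else result) result)
      = (fun result k => result ++ (PySem.List.pyRange 1 10 1).flatMap
          (fun s => (pvPad Hin Win Hout Wout k s).map (fun p => [k, s, p]))) := by
    funext result k
    have h1 : (fun (result : List (List Int)) s =>
        (let num := (Hin - 1) * s + k - Hout
         if 0 ≤ num ∧ PySem.Int.mod num 2 = 0 then
           let p := PySem.Int.floordiv num 2
           if p ≤ 9 ∧ (Win - 1) * s - 2 * p + k = Wout then result ++ [[k, s, p]]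
           else result
         else result))
        = (fun result s => result ++ (pvPad Hin Win Hout Wout k s).map (fun p => [k, s, p])) := by
      funext result s; exact B_inner Hin Win Hout Wout k s result
    rw [h1, PySem.List.foldl_append_eq_flatMap]
  rw [hA, hB]

-- ===== VERDICT (by name: the statement is the Claim_ definition above) =====
theorem ConvTransposeHW2newHW_spec : Claim_equal_ConvTransposeHW2newHW := by
  intro HWin HWout _ _
  unfold Spec_ConvTransposeHW2newHW ConvTransposeHW2newHW ConvTransposeHW2newHW_alt
  cases PySem.List.pyGet? HWin 0 <;> cases PySem.List.pyGet? HWin 1 <;>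
    cases PySem.List.pyGet? HWout 0 <;> cases PySem.List.pyGet? HWout 1 <;>
    try rfl
  case some.some.some.some Hin Win Hout Wout => exact loops_eq Hin Win Hout Wout
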